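-- pv_equiv track=rewrite | github.com/Aragath/NCTU-AICapstone2022 | environment.py | _expand_flight_plan
-- ===== SOURCE A (Python) =====
-- def _expand_flight_plan(flight_plan: str) -> str:
--     assert isinstance(flight_plan, str)
--
--     # 3W2E -> 000WWE
--
--     fp = ""
--     while flight_plan:
--         i = 0
--         while i < len(flight_plan) and flight_plan[i].isnumeric():
--             i += 1
--
--         if i == len(flight_plan):
--             # plan ends with a number
--             # but trailing number has no effect
--             break
--         elif i == 0:
--             # plan starts with NESWC
--             fp += flight_plan[i]
--         else:
--             # plan starts with a number
--             fp += int(flight_plan[:i]) * "0" + flight_plan[i]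
--
--         flight_plan = flight_plan[i+1:]
--
--     return fp
-- ===== SOURCE B (Python) =====
-- def _expand_flight_plan(flight_plan: str) -> str:
--     assert isinstance(flight_plan, str)
--     # single pass: accumulate the run-length digits, flush on each direction char
--     out = []
--     num = ""
--     for ch in flight_plan:
--         if ch.isnumeric():
--             num += ch
--         else:
--             out.append((int(num) if num else 0) * "0" + ch)
--             num = ""
--     # a trailing number has no effect
--     return "".join(out)
-- ===== Notes on version B (the rewrite author's own statement) =====
-- stated objective: faster
-- what changed: Replaced A's outer while loop that rescans the remaining string with an inner index loop and repeatedly re-slices it by a single for-pass over the characters that maintains a pending digit-run accumulator and flushes it at each direction character.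
import Mathlib
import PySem

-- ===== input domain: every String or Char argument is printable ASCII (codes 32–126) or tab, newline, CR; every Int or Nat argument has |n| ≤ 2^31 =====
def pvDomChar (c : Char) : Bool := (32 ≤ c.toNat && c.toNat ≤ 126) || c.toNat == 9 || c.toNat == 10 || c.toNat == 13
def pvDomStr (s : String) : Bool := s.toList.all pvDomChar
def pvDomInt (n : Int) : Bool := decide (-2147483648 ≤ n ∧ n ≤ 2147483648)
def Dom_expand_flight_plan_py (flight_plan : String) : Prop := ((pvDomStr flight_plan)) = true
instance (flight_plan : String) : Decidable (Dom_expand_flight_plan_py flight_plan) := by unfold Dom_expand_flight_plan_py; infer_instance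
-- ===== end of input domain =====

-- B replaces A's nested rescanning loops by a simpler single pass with a pending-digit-run
-- accumulator; the return values agree on all of Dom (A returns normally there).
-- Python's str.isnumeric agrees with str.isdigit ('0'..'9') on the printable-ASCII domain Dom,
-- so both ports render it as PySem.Chars.isdigit (exact on Dom).

-- ===== PORT A =====
-- inner loop `while i < len(flight_plan) and flight_plan[i].isnumeric(): i += 1`
def pvACount (s : List Char) (i : Nat) : Nat :=
  if i < s.length ∧ PySem.Chars.isdigit (s.getD i ' ') = true then pvACount s (i + 1) else i
termination_by s.length - i
decreasing_by omega

-- outer `while flight_plan:` loop; state = (remaining flight_plan, fp)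
def pvALoop (s : List Char) (fp : List Char) : List Char :=
  if hs : s = [] then fp
  else
    let i := pvACount s 0
    if i = s.length then fp              -- plan ends with a number: break
    else if i = 0 then
      pvALoop (s.drop (i + 1)) (fp ++ [s.getD i ' '])
    else
      -- int(flight_plan[:i]): a nonempty ASCII digit string here, so int() returns its value
      pvALoop (s.drop (i + 1))
        (fp ++ List.replicate ((PySem.Int.ofChars? (s.take i)).getD 0).toNat '0' ++ [s.getD i ' '])
termination_by s.length
decreasing_by
  all_goals
    have h0 : 0 < s.length := List.length_pos_iff.mpr hs
    simp [List.length_drop]; omega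

def expand_flight_plan_py (flight_plan : String) : String :=
  String.mk (pvALoop flight_plan.toList [])

-- ===== PORT B =====
-- one fold step; state = (output so far, pending digit run `num`)
def pvBStep (acc : List Char × List Char) (c : Char) : List Char × List Char :=
  if PySem.Chars.isdigit c then (acc.1, acc.2 ++ [c])
  else
    (acc.1 ++
       List.replicate (if acc.2.isEmpty then 0
                       else ((PySem.Int.ofChars? acc.2).getD 0).toNat) '0' ++ [c],
     [])

def expand_flight_plan_py_alt (flight_plan : String) : String :=
  String.mk (flight_plan.toList.foldl pvBStep ([], [])).1   -- trailing num discarded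

-- ===== PRECONDITION & SPEC =====
def Spec_expand_flight_plan_py (flight_plan : String) (out : String) : Prop := out = expand_flight_plan_py_alt flight_plan
instance (flight_plan : String) (out : String) : Decidable (Spec_expand_flight_plan_py flight_plan out) := by unfold Spec_expand_flight_plan_py; infer_instance

-- ===== CLAIM (what is proved, stated in full; the proofs are below) =====
def Claim_equal_expand_flight_plan_py : Prop := ∀ (flight_plan : String), Dom_expand_flight_plan_py flight_plan → Spec_expand_flight_plan_py flight_plan (expand_flight_plan_py flight_plan)

-- ===== LEMMAS AND PROOFS =====

-- value of a digit run, as both ports compute it (0 for the empty run)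
def pvVal (t : List Char) : Nat := ((PySem.Int.ofChars? t).getD 0).toNat

-- common characterisation of the expansion, by digit-run blocks
def pvE (s : List Char) : List Char :=
  match h : List.dropWhile PySem.Chars.isdigit s with
  | [] => []
  | c :: rest =>
      List.replicate (pvVal (List.takeWhile PySem.Chars.isdigit s)) '0' ++ c :: pvE rest
termination_by s.length
decreasing_by
  have := List.length_dropWhile_le (p := PySem.Chars.isdigit) (l := s)
  simp [h] at this; omega

theorem pvE_of_drop_nil (s : List Char) (h : List.dropWhile PySem.Chars.isdigit s = []) :
    pvE s = [] := by
  rw [pvE]; split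
  · rfl
  · rename_i c rest h'; rw [h] at h'; exact absurd h' (by simp)

theorem pvE_of_drop_cons (s : List Char) (c : Char) (rest : List Char)
    (h : List.dropWhile PySem.Chars.isdigit s = c :: rest) :
    pvE s = List.replicate (pvVal (List.takeWhile PySem.Chars.isdigit s)) '0' ++ c :: pvE rest := by
  rw [pvE]; split
  · rename_i h'; rw [h] at h'; exact absurd h' (by simp)
  · rename_i c' rest' h'; rw [h] at h'
    obtain ⟨rfl, rfl⟩ : c' = c ∧ rest' = rest := by
      constructor <;> injection h' <;> simp_all
    rfl

theorem pvACount_spec (s : List Char) (i : Nat) :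
    pvACount s i = i + (List.takeWhile PySem.Chars.isdigit (s.drop i)).length := by
  fun_induction pvACount s i
  case case1 =>
    rename_i i h ih
    obtain ⟨hlt, hd⟩ := h
    rw [List.getD_eq_getElem s ' ' hlt] at hd
    rw [ih, List.drop_eq_getElem_cons hlt, List.takeWhile_cons]
    simp [hd]; omega
  case case2 =>
    rename_i i h
    by_cases hlt : i < s.length
    · have hd : PySem.Chars.isdigit s[i] = false := by
        rcases Bool.eq_false_or_eq_true (PySem.Chars.isdigit s[i]) with h'|h'
        · exact absurd ⟨hlt, by rw [List.getD_eq_getElem s ' ' hlt]; exact h'⟩ h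
        · exact h'
      rw [List.drop_eq_getElem_cons hlt, List.takeWhile_cons]
      simp [hd]
    · rw [List.drop_eq_nil_of_le (by omega)]; simp

theorem pvALoop_spec (s fp : List Char) : pvALoop s fp = fp ++ pvE s := by
  fun_induction pvALoop s fp
  case case1 =>
    rename_i fp
    rw [pvE_of_drop_nil [] (by simp)]; simp
  case case2 =>
    rename_i s fp hs i hi
    have ht : i = (List.takeWhile PySem.Chars.isdigit s).length := by
      show pvACount s 0 = _; rw [pvACount_spec]; simp
    have htd := List.takeWhile_append_dropWhile (p := PySem.Chars.isdigit) (l := s)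
    have hlen : (List.takeWhile PySem.Chars.isdigit s).length
        + (List.dropWhile PySem.Chars.isdigit s).length = s.length := by
      conv_rhs => rw [← htd]
      exact List.length_append.symm
    have hd : List.dropWhile PySem.Chars.isdigit s = [] := by
      have : (List.dropWhile PySem.Chars.isdigit s).length = 0 := by omega
      exact List.eq_nil_of_length_eq_zero this
    rw [pvE_of_drop_nil s hd]; simp
  case case3 =>
    rename_i s fp hs i hi h0 ih
    have ht : i = (List.takeWhile PySem.Chars.isdigit s).length := by
      show pvACount s 0 = _; rw [pvACount_spec]; simp
    have htnil : List.takeWhile PySem.Chars.isdigit s = [] :=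
      List.eq_nil_of_length_eq_zero (by omega)
    have hd : List.dropWhile PySem.Chars.isdigit s = s := by
      conv_rhs => rw [← List.takeWhile_append_dropWhile (p := PySem.Chars.isdigit) (l := s)]
      rw [htnil]; simp
    obtain ⟨c, rest, rfl⟩ : ∃ c rest, s = c :: rest := by
      cases s with
      | nil => exact absurd rfl hs
      | cons c rest => exact ⟨c, rest, rfl⟩
    rw [ih, pvE_of_drop_cons _ c rest hd, htnil]
    have hv : pvVal [] = 0 := by decide
    rw [hv]
    simp [h0]
  case case4 =>
    rename_i s fp hs i hi h0 ih
    have ht : i = (List.takeWhile PySem.Chars.isdigit s).length := by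
      show pvACount s 0 = _; rw [pvACount_spec]; simp
    have htd := List.takeWhile_append_dropWhile (p := PySem.Chars.isdigit) (l := s)
    have hlen : (List.takeWhile PySem.Chars.isdigit s).length
        + (List.dropWhile PySem.Chars.isdigit s).length = s.length := by
      conv_rhs => rw [← htd]
      exact List.length_append.symm
    obtain ⟨c, rest, hd⟩ : ∃ c rest, List.dropWhile PySem.Chars.isdigit s = c :: rest := by
      cases hcase : List.dropWhile PySem.Chars.isdigit s with
      | nil => exact absurd (by rw [hcase] at hlen; simp at hlen; omega : i = s.length) hi
      | cons c rest => exact ⟨c, rest, rfl⟩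
    have hdropi : List.drop i s = c :: rest := by
      conv_lhs => rw [← htd]
      rw [ht, List.drop_left, hd]
    have hilt : i < s.length := by omega
    have hgetD : s.getD i ' ' = c := by
      rw [List.getD_eq_getElem s ' ' hilt]
      have h2 : (List.drop i s)[0]'(by rw [hdropi]; simp) = c := by simp [hdropi]
      rw [List.getElem_drop] at h2
      simpa using h2
    have hdrop1 : List.drop (i + 1) s = rest := by
      rw [← List.drop_drop (i := 1) (j := i), hdropi]; simp
    have htake : List.take i s = List.takeWhile PySem.Chars.isdigit s := by
      conv_lhs => rw [← htd]
      rw [ht, List.take_left]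
    rw [ih, pvE_of_drop_cons s c rest hd, hgetD, hdrop1, htake]
    show _ = fp ++ (List.replicate (pvVal _) '0' ++ c :: pvE rest)
    unfold pvVal
    simp

theorem pvFold_spec (s out num : List Char)
    (h : ∀ c ∈ num, PySem.Chars.isdigit c = true) :
    (s.foldl pvBStep (out, num)).1 = out ++ pvE (num ++ s) := by
  induction s generalizing out num with
  | nil =>
    rw [List.foldl_nil, List.append_nil,
        pvE_of_drop_nil num (List.dropWhile_eq_nil_iff.mpr (by simpa using h))]
    simp
  | cons c s' ih =>
    rw [List.foldl_cons]
    by_cases hc : PySem.Chars.isdigit c = true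
    · rw [show pvBStep (out, num) c = (out, num ++ [c]) from by simp [pvBStep, hc]]
      rw [ih out (num ++ [c]) (by intro x hx; rcases List.mem_append.mp hx with hx | hx
                                  · exact h x hx
                                  · simp at hx; subst hx; exact hc)]
      simp
    · have hc' : PySem.Chars.isdigit c = false := by simpa using hc
      rw [show pvBStep (out, num) c
            = (out ++ List.replicate (if num.isEmpty then 0
                       else ((PySem.Int.ofChars? num).getD 0).toNat) '0' ++ [c], []) from by
            simp [pvBStep, hc']]
      rw [ih _ [] (by simp)]
      have hdw : List.dropWhile PySem.Chars.isdigit (num ++ c :: s') = c :: s' := by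
        rw [List.dropWhile_append]
        simp [List.dropWhile_eq_nil_iff.mpr (by simpa using h), hc']
      have htw : List.takeWhile PySem.Chars.isdigit (num ++ c :: s') = num := by
        rw [List.takeWhile_append_of_pos h, List.takeWhile_cons_of_neg (by simp [hc'])]
        simp
      rw [pvE_of_drop_cons _ c s' hdw, htw]
      have hval : (if num.isEmpty then 0
                   else ((PySem.Int.ofChars? num).getD 0).toNat) = pvVal num := by
        cases num with
        | nil => decide
        | cons a l => simp [pvVal]
      rw [hval]
      simp

-- ===== VERDICT (by name: the statement is the Claim_ definition above) =====
theorem expand_flight_plan_py_spec : Claim_equal_expand_flight_plan_py := by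
  intro fp _
  unfold Spec_expand_flight_plan_py expand_flight_plan_py expand_flight_plan_py_alt
  rw [pvALoop_spec, pvFold_spec fp.toList [] [] (by simp)]
  simp
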